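-- pv_equiv track=rewrite | github.com/david-benavides-dev/1dawb-u3python | src/diccionarios/ej32_07.py | mostrar_productos
-- ===== SOURCE A (Python) =====
-- def mostrar_productos(productos: dict):
--     """
--
--     """
--     productos_totales = contar_productos(productos)
--     precio_total = sumar_precio_productos(productos)
--     productos_string = "Lista de la compra\n"
--
--     # Artículo 1 	Precio
--     # Artículo 2 	Precio
--     # Artículo 3 	Precio
--     # … 	…
--     # Total 	Coste
--
--     for producto, precio in productos.items():
--         productos_string += f"{producto}    {precio} €\n"
--
--     productos_string += f"{productos_totales}   {precio_total} €"
--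
--     return productos_string
--
-- def contar_productos(productos: dict):
--     """
--
--     """
--     cantidad_productos = 0
--
--     for _ in productos:
--         cantidad_productos += 1
--
--     return cantidad_productos
--
-- def sumar_precio_productos(productos: dict):
--     """
--
--     """
--     precio_total = 0
--
--     for producto in productos.values():
--         precio_total+= producto
--
--     return precio_total
-- ===== SOURCE B (Python) =====
-- def mostrar_productos(productos: dict):
--     cantidad = 0
--     precio_total = 0
--     lineas = []
--     for producto, precio in productos.items():
--         cantidad += 1
--         precio_total += precio
--         lineas.append(f"{producto}    {precio} €")
--     lineas.append(f"{cantidad}   {precio_total} €")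
--     return "Lista de la compra\n" + "\n".join(lineas)
-- ===== Notes on version B (the rewrite author's own statement) =====
-- stated objective: simpler
-- what changed: Replaced the two helper functions and three sequential passes (count loop, sum loop, string-building loop) by one loop accumulating count, running total and the formatted line strings, assembled at the end with '\n'.join.
import Mathlib
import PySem

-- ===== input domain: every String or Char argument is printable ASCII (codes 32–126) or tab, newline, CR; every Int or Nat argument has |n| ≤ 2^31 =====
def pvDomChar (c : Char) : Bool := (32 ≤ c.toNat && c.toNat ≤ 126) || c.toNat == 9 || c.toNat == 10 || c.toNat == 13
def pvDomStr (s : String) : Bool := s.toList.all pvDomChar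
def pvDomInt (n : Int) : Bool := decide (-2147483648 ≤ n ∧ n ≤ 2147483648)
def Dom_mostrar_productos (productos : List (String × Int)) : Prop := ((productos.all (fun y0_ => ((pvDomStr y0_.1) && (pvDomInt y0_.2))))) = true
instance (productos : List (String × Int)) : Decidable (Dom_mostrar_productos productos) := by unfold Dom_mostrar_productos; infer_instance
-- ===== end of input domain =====

-- B replaces A's two helper functions and three sequential passes by a single loop
-- accumulating count, running total and the formatted lines, then joins them (objective: simpler).

-- ===== PORT A =====
def contar_productos (productos : List (String × Int)) : Int :=
  productos.foldl (fun acc _ => acc + 1) 0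

def sumar_precio_productos (productos : List (String × Int)) : Int :=
  productos.foldl (fun acc p => acc + p.2) 0

def mostrar_productos (productos : List (String × Int)) : String :=
  let productos_totales := contar_productos productos
  let precio_total := sumar_precio_productos productos
  let s0 := "Lista de la compra\n"
  let s1 := productos.foldl
    (fun acc p => acc ++ p.1 ++ "    " ++ PySem.Int.toStr p.2 ++ " €\n") s0
  s1 ++ PySem.Int.toStr productos_totales ++ "   " ++ PySem.Int.toStr precio_total ++ " €"

-- ===== PORT B =====
def mostrar_productos_alt (productos : List (String × Int)) : String :=
  let st := productos.foldl
    (fun (st : Int × Int × List String) p =>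
      (st.1 + 1, st.2.1 + p.2, st.2.2 ++ [p.1 ++ "    " ++ PySem.Int.toStr p.2 ++ " €"]))
    (0, 0, [])
  let lineas := st.2.2 ++ [PySem.Int.toStr st.1 ++ "   " ++ PySem.Int.toStr st.2.1 ++ " €"]
  "Lista de la compra\n" ++ PySem.Str.join "\n" lineas

-- ===== PRECONDITION & SPEC =====
def Spec_mostrar_productos (productos : List (String × Int)) (out : String) : Prop := out = mostrar_productos_alt productos
instance (productos : List (String × Int)) (out : String) : Decidable (Spec_mostrar_productos productos out) := by unfold Spec_mostrar_productos; infer_instance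

-- ===== CLAIM (what is proved, stated in full; the proofs are below) =====
def Claim_equal_mostrar_productos : Prop := ∀ (productos : List (String × Int)), Dom_mostrar_productos productos → Spec_mostrar_productos productos (mostrar_productos productos)

-- ===== LEMMAS AND PROOFS =====

-- B's single fold computes A's three folds at once (lines collected via map).
theorem pv_fold_triple (ps : List (String × Int)) (c t : Int) (ls : List String) :
    ps.foldl
      (fun (st : Int × Int × List String) p =>
        (st.1 + 1, st.2.1 + p.2, st.2.2 ++ [p.1 ++ "    " ++ PySem.Int.toStr p.2 ++ " €"]))
      (c, t, ls)
    = (ps.foldl (fun acc _ => acc + 1) c,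
       ps.foldl (fun acc p => acc + p.2) t,
       ls ++ ps.map (fun p => p.1 ++ "    " ++ PySem.Int.toStr p.2 ++ " €")) := by
  induction ps generalizing c t ls with
  | nil => simp
  | cons p ps ih => simp [List.foldl_cons, ih]

-- A's newline-terminated accumulation equals header ++ '\n'-join with the final line appended.
theorem pv_join_lemma (ls : List (List Char)) (fin acc : List Char) :
    ls.foldl (fun acc s => acc ++ (s ++ ['\n'])) acc ++ fin
      = acc ++ PySem.Chars.join ['\n'] (ls ++ [fin]) := by
  induction ls generalizing acc with
  | nil => simp [PySem.Chars.join_singleton]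
  | cons l ls ih =>
    cases h : ls ++ [fin] with
    | nil => simp at h
    | cons b rest =>
      rw [List.foldl_cons, ih, List.cons_append, h, PySem.Chars.join_cons_cons]
      simp

theorem pv_toList_fold (ps : List (String × Int)) (acc : String) :
    (ps.foldl (fun acc p => acc ++ p.1 ++ "    " ++ PySem.Int.toStr p.2 ++ " €\n") acc).toList
      = (ps.map (fun p => (p.1 ++ "    " ++ PySem.Int.toStr p.2 ++ " €").toList)).foldl
          (fun acc s => acc ++ s ++ ['\n']) acc.toList := by
  induction ps generalizing acc with
  | nil => simp
  | cons p ps ih => simp [List.foldl_cons, ih]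

-- ===== VERDICT (by name: the statement is the Claim_ definition above) =====
theorem mostrar_productos_spec : Claim_equal_mostrar_productos := by
  intro ps _
  unfold Spec_mostrar_productos mostrar_productos mostrar_productos_alt
  rw [pv_fold_triple]
  apply String.toList_injective
  simp only [String.toList_append, pv_toList_fold, PySem.Str.toList_join,
    List.map_append, List.map_map, List.append_assoc]
  rw [pv_join_lemma]
  simp [contar_productos, sumar_precio_productos, Function.comp_def]
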